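-- pv_equiv track=rewrite | github.com/pratyaydeep/Python-programs | ProjectEuler/Problem16_ProjectEuler.py | multiply2
-- ===== SOURCE A (Python) =====
-- def multiply2(n):
--     result = ""
--     n = n [::-1]
--     remember = 0
--     for i in range(len(n)):
--         a =  int(n[i])*2 + remember
--         result += str(a%10)
--         remember = a//10
--     if remember == 1:
--         result += "1"
--     result = result[::-1]
--     return result
-- ===== SOURCE B (Python) =====
-- def multiply2(n):
--     # Carry-lookahead doubling: when multiplying by 2, the carry into a digit is 1
--     # exactly when its right neighbour is >= 5 (2*d + cin >= 10 <=> d >= 5 for cin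
--     # in {0,1}), so each output digit is a pure function of the pair (digit, right
--     # neighbour) -- no sequential carry state at all.
--     ds = [int(ch) for ch in n]
--     out = ''.join(str((2 * d + (1 if nxt >= 5 else 0)) % 10)
--                   for d, nxt in zip(ds, ds[1:] + [0]))
--     return ('1' if ds and ds[0] >= 5 else '') + out
-- ===== Notes on version B (the rewrite author's own statement) =====
-- stated objective: alternative
-- what changed: A's sequential right-to-left loop threading a carry variable is replaced by a carry-lookahead scheme: when doubling, the carry into a position is 1 exactly when the digit to its right is >= 5, so B computes every output digit as a pure function of the pair (digit, right neighbour) via zip, with no carry state, plus a leading '1' iff the first digit is >= 5.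
import Mathlib
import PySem

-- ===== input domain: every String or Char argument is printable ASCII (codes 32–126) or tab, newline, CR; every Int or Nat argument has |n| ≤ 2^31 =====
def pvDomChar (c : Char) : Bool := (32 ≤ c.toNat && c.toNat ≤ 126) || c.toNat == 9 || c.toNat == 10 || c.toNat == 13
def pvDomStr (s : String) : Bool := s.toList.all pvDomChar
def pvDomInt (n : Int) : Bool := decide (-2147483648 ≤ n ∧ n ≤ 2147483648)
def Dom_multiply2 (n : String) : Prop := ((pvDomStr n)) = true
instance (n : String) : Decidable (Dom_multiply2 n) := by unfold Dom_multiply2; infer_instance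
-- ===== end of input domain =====

-- B replaces A's sequential carry loop by carry-lookahead: the carry into a position is 1
-- exactly when the digit to its right is >= 5, so each output digit is a pure function of
-- the pair (digit, right neighbour); no carry state (objective: alternative).

-- ===== PORT A =====
-- loop body of A: a = int(n[i])*2 + remember; result += str(a%10); remember = a//10
def multiply2_step (rs : List Char) (st : List Char × Int) (i : Nat) : List Char × Int :=
  let a := ((PySem.Int.ofStr? (String.mk [rs.getD i ' '])).getD 0) * 2 + st.2
  (st.1 ++ (PySem.Int.toStr (PySem.Int.mod a 10)).toList, PySem.Int.floordiv a 10)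

def multiply2 (n : String) : String :=
  let rs := n.toList.reverse
  let st := (List.range rs.length).foldl (multiply2_step rs) ([], 0)
  let result := if st.2 = 1 then st.1 ++ ['1'] else st.1
  String.mk result.reverse

-- ===== PORT B =====
-- ds = [int(ch) for ch in n]; each output digit from zip(ds, ds[1:]+[0]);
-- prefix '1' if ds and ds[0] >= 5 (an empty ds has headD 0 < 5, matching Python's falsy [])
def multiply2_alt (n : String) : String :=
  let ds := n.toList.map (fun c => (PySem.Int.ofStr? (String.mk [c])).getD 0)
  let out := ((ds.zip (ds.drop 1 ++ [0])).map
      (fun p => (PySem.Int.toStr (PySem.Int.mod (2 * p.1 + (if 5 ≤ p.2 then 1 else 0)) 10)).toList)).flatten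
  String.mk ((if 5 ≤ ds.headD 0 then ['1'] else []) ++ out)

-- ===== PRECONDITION & SPEC =====
-- Pre_ excludes exactly the inputs containing a non-digit character, on which A's
-- per-character int() raises ValueError (B raises the same way there).
def Pre_multiply2 (n : String) : Prop := (n.toList.all Char.isDigit) = true
instance (n : String) : Decidable (Pre_multiply2 n) := by unfold Pre_multiply2; infer_instance
def pvWitness_multiply2 : String := "1907"
def Spec_multiply2 (n : String) (out : String) : Prop := out = multiply2_alt n
instance (n : String) (out : String) : Decidable (Spec_multiply2 n out) := by unfold Spec_multiply2; infer_instance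

-- ===== CLAIM (what is proved, stated in full; the proofs are below) =====
def Claim_equal_multiply2 : Prop := ∀ (n : String), Dom_multiply2 n → Pre_multiply2 n → Spec_multiply2 n (multiply2 n)

-- ===== LEMMAS AND PROOFS =====

-- value of a digit char, the emitted char block, A's carry-out of one digit
def dval (c : Char) : Int := (PySem.Int.ofStr? (String.mk [c])).getD 0
def dchar (m : Int) : List Char := (PySem.Int.toStr (PySem.Int.mod m 10)).toList
def coutd (c : Char) : Int := if 5 ≤ dval c then 1 else 0

-- A's loop, unrolled structurally: the emitted chars and the threaded carry
def Adigits : List Char → Int → List Char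
  | [], _ => []
  | c :: t, rem => dchar (dval c * 2 + rem) ++ Adigits t (PySem.Int.floordiv (dval c * 2 + rem) 10)
def Acarry : List Char → Int → Int
  | [], rem => rem
  | c :: t, rem => Acarry t (PySem.Int.floordiv (dval c * 2 + rem) 10)

-- a digit character parses (as a one-char string) to its value
theorem digit_ofStr (c : Char) (h1 : '0' ≤ c) (h2 : c ≤ '9') :
    PySem.Int.ofStr? (String.mk [c]) = some ((c.toNat : Int) - 48) := by
  have hc : c = Char.ofNat c.toNat := (Char.ofNat_toNat c).symm
  have h1' : 48 ≤ c.toNat := h1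
  have h2' : c.toNat ≤ 57 := h2
  rw [hc]
  generalize hk : c.toNat = k at h1' h2' ⊢
  interval_cases k <;> decide

-- str(m) of a one-digit number is that single digit character
theorem toStr_digit (m : Int) (h1 : 0 ≤ m) (h2 : m ≤ 9) :
    (PySem.Int.toStr m).toList = [Char.ofNat (48 + m.toNat)] := by
  interval_cases m <;> decide

-- dchar is always a single character
theorem dchar_single (m : Int) : dchar m = [Char.ofNat (48 + (PySem.Int.mod m 10).toNat)] := by
  have h0 : 0 ≤ PySem.Int.mod m 10 := PySem.Int.mod_nonneg m (by omega)
  have h9 : PySem.Int.mod m 10 ≤ 9 := by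
    have := PySem.Int.mod_lt m (show (0:Int) < 10 by omega); omega
  exact toStr_digit _ h0 h9

-- a digit char has value in [0,9]
theorem dval_bounds (c : Char) (h : c.isDigit = true) : 0 ≤ dval c ∧ dval c ≤ 9 := by
  have h' : 48 ≤ c.val ∧ c.val ≤ 57 := by simpa [Char.isDigit] using h
  have h1 : '0' ≤ c := h'.1
  have h2 : c ≤ '9' := h'.2
  have h1' : 48 ≤ c.toNat := h1
  have h2' : c.toNat ≤ 57 := h2
  unfold dval
  rw [digit_ofStr c h1 h2]
  simp; omega

-- the carry out of doubling a digit is independent of its carry-in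
theorem floordiv_cout (c : Char) (rem : Int) (hd : c.isDigit = true)
    (h0 : 0 ≤ rem) (h1 : rem ≤ 1) :
    PySem.Int.floordiv (dval c * 2 + rem) 10 = coutd c := by
  obtain ⟨hv0, hv9⟩ := dval_bounds c hd
  rw [PySem.Int.floordiv_eq_ediv_of_pos (by omega)]
  unfold coutd
  split_ifs with h <;> omega

theorem coutd_bounds (c : Char) : 0 ≤ coutd c ∧ coutd c ≤ 1 := by
  unfold coutd; split_ifs <;> omega

-- folding over range with getD = folding over the list itself
theorem foldl_range_getD {α β : Type} (l : List α) (d : α) (g : β → α → β) (init : β) :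
    (List.range l.length).foldl (fun s i => g s (l.getD i d)) init = l.foldl g init := by
  induction l generalizing init with
  | nil => simp
  | cons a t ih =>
    simp only [List.length_cons, List.range_succ_eq_map, List.foldl_cons, List.foldl_map,
      List.getD_cons_zero, List.getD_cons_succ]
    exact ih (g init a)

-- the A-side step as a function of the character itself
def stepA (st : List Char × Int) (c : Char) : List Char × Int :=
  let a := ((PySem.Int.ofStr? (String.mk [c])).getD 0) * 2 + st.2
  (st.1 ++ (PySem.Int.toStr (PySem.Int.mod a 10)).toList, PySem.Int.floordiv a 10)

theorem multiply2_step_eq (rs : List Char) :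
    multiply2_step rs = fun st i => stepA st (rs.getD i ' ') := rfl

-- A's foldl computes Adigits/Acarry
theorem foldl_stepA (rs : List Char) (res : List Char) (rem : Int) :
    rs.foldl stepA (res, rem) = (res ++ Adigits rs rem, Acarry rs rem) := by
  induction rs generalizing res rem with
  | nil => simp [Adigits, Acarry]
  | cons c t ih =>
    simp only [List.foldl_cons, stepA, Adigits, Acarry]
    rw [ih]
    simp [dval, dchar, List.append_assoc]

-- Acarry of an all-digit list stays in {0,1}
theorem Acarry_bounds (rs : List Char) (h : ∀ c ∈ rs, c.isDigit = true)
    (rem : Int) (h0 : 0 ≤ rem) (h1 : rem ≤ 1) :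
    0 ≤ Acarry rs rem ∧ Acarry rs rem ≤ 1 := by
  induction rs generalizing rem with
  | nil => exact ⟨h0, h1⟩
  | cons c t ih =>
    have hc := h c (List.mem_cons_self ..)
    simp only [Acarry, floordiv_cout c rem hc h0 h1]
    exact ih (fun x hx => h x (List.mem_cons_of_mem _ hx)) _ (coutd_bounds c).1 (coutd_bounds c).2

-- appending one most-significant digit to A's loop
theorem Adigits_append (xs : List Char) (c : Char) (h : ∀ x ∈ xs, x.isDigit = true)
    (rem : Int) (h0 : 0 ≤ rem) (h1 : rem ≤ 1) :
    Adigits (xs ++ [c]) rem = Adigits xs rem ++ dchar (dval c * 2 + Acarry xs rem) ∧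
    Acarry (xs ++ [c]) rem = PySem.Int.floordiv (dval c * 2 + Acarry xs rem) 10 := by
  induction xs generalizing rem with
  | nil => simp [Adigits, Acarry]
  | cons x t ih =>
    have hx := h x (List.mem_cons_self ..)
    simp only [List.cons_append, Adigits, Acarry]
    have := ih (fun y hy => h y (List.mem_cons_of_mem _ hy))
      (PySem.Int.floordiv (dval x * 2 + rem) 10)
      (by rw [floordiv_cout x rem hx h0 h1]; exact (coutd_bounds x).1)
      (by rw [floordiv_cout x rem hx h0 h1]; exact (coutd_bounds x).2)
    exact ⟨by rw [this.1, List.append_assoc], this.2⟩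

-- B's digit list on ds equals reverse of A's loop output on ds.reverse, and A's final
-- carry is the lookahead carry of the leading digit
theorem main_inv (ds : List Char) (h : ∀ c ∈ ds, c.isDigit = true) :
    (Adigits ds.reverse 0).reverse =
      (((ds.map dval).zip ((ds.map dval).drop 1 ++ [0])).map
        (fun p => (PySem.Int.toStr (PySem.Int.mod (2 * p.1 + (if 5 ≤ p.2 then 1 else 0)) 10)).toList)).flatten ∧
    Acarry ds.reverse 0 = coutd (ds.headD '0') := by
  induction ds with
  | nil => simp [Adigits, Acarry, coutd, dval]; decide
  | cons c t ih =>
    have ht : ∀ x ∈ t, x.isDigit = true := fun x hx => h x (List.mem_cons_of_mem _ hx)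
    have hrevdig : ∀ x ∈ t.reverse, x.isDigit = true := by
      intro x hx; exact ht x (List.mem_reverse.mp hx)
    obtain ⟨hdig, hcar⟩ := ih ht
    have hap := Adigits_append t.reverse c hrevdig 0 le_rfl (by omega)
    have hcb := Acarry_bounds t.reverse hrevdig 0 le_rfl (by omega)
    have hnext : dval (t.headD '0') = (t.map dval).headD 0 := by
      cases t
      · simp [dval]; decide
      · simp [dval]
    constructor
    · rw [List.reverse_cons, hap.1, List.reverse_append, hdig, hcar]
      have hzip : ((c :: t).map dval).zip (((c :: t).map dval).drop 1 ++ [0])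
          = (dval c, (t.map dval).headD 0) :: ((t.map dval).zip ((t.map dval).drop 1 ++ [0])) := by
        cases t <;> simp
      have harg : dval c * 2 + coutd (t.headD '0')
          = 2 * dval c + (if 5 ≤ (t.map dval).headD 0 then 1 else 0) := by
        unfold coutd; rw [hnext]; ring
      rw [harg, hzip]
      simp only [List.map_cons, List.flatten_cons]
      have hsing := dchar_single (2 * dval c + (if 5 ≤ (List.map dval t).headD 0 then 1 else 0))
      rw [hsing]
      unfold dchar at hsing
      rw [hsing]
      simp
    · rw [List.reverse_cons, hap.2, hcar]
      exact floordiv_cout c _ (h c (List.mem_cons_self ..)) (coutd_bounds _).1 (coutd_bounds _).2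

-- ===== VERDICT (by name: the statement is the Claim_ definition above) =====
theorem multiply2_spec : Claim_equal_multiply2 := by
  intro n _ hpre
  unfold Spec_multiply2 multiply2 multiply2_alt
  simp only [multiply2_step_eq, foldl_range_getD, foldl_stepA, List.nil_append]
  have hd : ∀ c ∈ n.toList, c.isDigit = true := fun c hc => List.all_eq_true.mp hpre c hc
  obtain ⟨hdig, hcar⟩ := main_inv n.toList hd
  have hhead : dval (n.toList.headD '0') = (n.toList.map dval).headD 0 := by
    cases n.toList
    · simp [dval]; decide
    · simp [dval]
  have hmap : n.toList.map (fun c => (PySem.Int.ofStr? (String.mk [c])).getD 0)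
      = n.toList.map dval := rfl
  rw [hmap]
  by_cases h5 : 5 ≤ (n.toList.map dval).headD 0
  · have hc1 : Acarry n.toList.reverse 0 = 1 := by
      rw [hcar]; unfold coutd; rw [hhead, if_pos h5]
    rw [hc1, if_pos rfl, if_pos h5]
    simp only [List.reverse_append, List.reverse_cons, List.reverse_nil, List.nil_append]
    rw [hdig]
  · have hc0 : Acarry n.toList.reverse 0 = 0 := by
      rw [hcar]; unfold coutd; rw [hhead, if_neg h5]
    rw [hc0, if_neg (by omega : (0:Int) ≠ 1), if_neg h5, hdig]
    simp
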